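-- pv_equiv track=rewrite | github.com/shayneobrien/text-segmentation | models/hearst-baseline.py | _depth_scores
-- ===== SOURCE A (Python) =====
-- def _depth_scores(scores):
--     """Calculates the depth of each gap, i.e. the average difference
--     between the left and right peaks and the gap's score"""
--
--     depth_scores = [0 for _ in scores]
--     # clip boundaries: this holds on the rule of thumb(my thumb)
--     # that a section shouldn't be smaller than at least 2
--     # pseudosentences for small texts and around 5 for larger ones.
--
--     clip = int(min(max(len(scores)/10, 2), 5))
--     index = clip
--
--     for gapscore in scores[clip:-clip]:
--         lpeak = gapscore
--         for score in scores[index::-1]: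
--             if score >= lpeak:
--                 lpeak = score
--             else:
--                 break
--         rpeak = gapscore
--         for score in scores[index:]:
--             if score >= rpeak:
--                 rpeak = score
--             else:
--                 break
--         depth_scores[index] = lpeak + rpeak - 2 * gapscore
--         index += 1
--
--     return depth_scores
-- ===== SOURCE B (Python) =====
-- def _run_peaks(scores):
--     """peaks[i] = the max of the maximal run ending at i that the
--     left-to-right 'scan while >= running peak' process reaches:
--     peaks[i] = peaks[i-1] if scores[i-1] >= scores[i] else scores[i]."""
--     peaks = []
--     prev = None
--     for s in scores:
--         if prev is not None and prev >= s:
--             peaks.append(peaks[-1])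
--         else:
--             peaks.append(s)
--         prev = s
--     return peaks
--
--
-- def _depth_scores(scores):
--     n = len(scores)
--     clip = min(max(n // 10, 2), 5)
--     left = _run_peaks(scores)
--     right = _run_peaks(scores[::-1])[::-1]
--     return [l + r - 2 * s if clip <= i < n - clip else 0
--             for i, (s, l, r) in enumerate(zip(scores, left, right))]
-- ===== Notes on version B (the rewrite author's own statement) =====
-- stated objective: faster
-- what changed: B replaces A's per-gap left/right rescans with two single-pass run-peak arrays (peaks[i] = peaks[i-1] if scores[i-1] >= scores[i] else scores[i], and the same on the reversed list), then emits each depth in one zip pass.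
import Mathlib
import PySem

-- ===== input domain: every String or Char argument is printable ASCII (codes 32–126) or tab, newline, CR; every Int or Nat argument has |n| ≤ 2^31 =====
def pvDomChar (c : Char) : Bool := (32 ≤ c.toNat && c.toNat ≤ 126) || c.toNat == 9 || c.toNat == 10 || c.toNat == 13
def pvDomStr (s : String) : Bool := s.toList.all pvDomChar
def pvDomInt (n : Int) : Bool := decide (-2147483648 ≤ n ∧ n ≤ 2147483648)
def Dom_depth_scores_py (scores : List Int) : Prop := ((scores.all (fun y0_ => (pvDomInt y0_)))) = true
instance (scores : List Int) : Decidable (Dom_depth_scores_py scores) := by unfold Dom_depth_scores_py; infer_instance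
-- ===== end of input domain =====

-- B replaces A's per-gap left/right rescans by two O(n) run-peak passes (a simpler, asymptotically faster algorithm with the same output).

-- ===== PORT A =====
-- A-side helper: the two identical inner 'for … if score >= peak: peak = score else break' loops
def dsScanW (p : Int) : List Int → Int
  | [] => p
  | s :: rest => if s ≥ p then dsScanW s rest else p

-- A's main loop; state = (depth_scores, index).  scores[index::-1] is (scores.take (index+1)).reverse
-- and scores[index:] is scores.drop index (exact: index ≥ 0 throughout, clamping matches Python's).
def dsLoop (scores : List Int) : List Int → List Int × Nat → List Int × Nat
  | [], st => st
  | g :: rest, st =>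
      dsLoop scores rest
        (st.1.set st.2 (dsScanW g ((scores.take (st.2 + 1)).reverse)
                        + dsScanW g (scores.drop st.2) - 2 * g),
         st.2 + 1)

def depth_scores_py (scores : List Int) : List Int :=
  -- clip = int(min(max(len(scores)/10, 2), 5)): the CPython float arithmetic is exact wherever the
  -- result is not clamped to 2 or 5, so this equals the Nat expression below (len ≥ 0).
  let clip : Nat := min (max (scores.length / 10) 2) 5
  let init : List Int := scores.map (fun _ => (0 : Int))
  (dsLoop scores (PySem.List.slice scores (some (clip : Int)) (some (-(clip : Int)))) (init, clip)).1

-- ===== PORT B =====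
-- B-side helper: _run_peaks (one forward pass; peaks[i] = peaks[i-1] if scores[i-1] >= scores[i] else scores[i])
def runPeaksAux (peak prev : Int) : List Int → List Int
  | [] => []
  | s :: rest =>
      let p := if prev ≥ s then peak else s
      p :: runPeaksAux p s rest

def runPeaks : List Int → List Int
  | [] => []
  | s :: rest => s :: runPeaksAux s s rest

def depth_scores_py_alt (scores : List Int) : List Int :=
  let n := scores.length
  let clip : Nat := min (max (n / 10) 2) 5
  let left := runPeaks scores
  let right := (runPeaks scores.reverse).reverse     -- scores[::-1] reversed back
  (PySem.List.enumerate (scores.zip (left.zip right))).map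
    (fun p => if (clip : Int) ≤ p.1 ∧ p.1 < (n : Int) - (clip : Int)
              then p.2.2.1 + p.2.2.2 - 2 * p.2.1 else 0)

-- ===== PRECONDITION & SPEC =====
def Spec_depth_scores_py (scores : List Int) (out : List Int) : Prop := out = depth_scores_py_alt scores
instance (scores : List Int) (out : List Int) : Decidable (Spec_depth_scores_py scores out) := by unfold Spec_depth_scores_py; infer_instance

-- ===== CLAIM (what is proved, stated in full; the proofs are below) =====
def Claim_equal_depth_scores_py : Prop := ∀ (scores : List Int), Dom_depth_scores_py scores → Spec_depth_scores_py scores (depth_scores_py scores)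

-- ===== LEMMAS AND PROOFS =====

-- the common per-gap value both programs compute at an in-band index j
def dval (scores : List Int) (j : Nat) : Int :=
  dsScanW (scores.getD j 0) ((scores.take (j + 1)).reverse)
  + dsScanW (scores.getD j 0) (scores.drop j) - 2 * scores.getD j 0

lemma dsScanW_cons_self (s : Int) (l : List Int) : dsScanW s (s :: l) = dsScanW s l := by
  simp [dsScanW]

lemma dsLoop_fst_length (scores : List Int) :
    ∀ (l : List Int) (ds : List Int) (idx : Nat),
      ((dsLoop scores l (ds, idx)).1).length = ds.length := by
  intro l
  induction l with
  | nil => intro ds idx; simp [dsLoop]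
  | cons g rest ih => intro ds idx; simp [dsLoop, ih]

lemma dsLoop_getD (scores : List Int) :
    ∀ (m idx : Nat) (ds : List Int), ds.length = scores.length → ∀ (j : Nat),
      ((dsLoop scores ((scores.drop idx).take m) (ds, idx)).1).getD j 0
      = if idx ≤ j ∧ j < idx + m ∧ j < scores.length then dval scores j else ds.getD j 0 := by
  intro m
  induction m with
  | zero =>
      intro idx ds _ j
      simp only [List.take_zero, dsLoop]
      rw [if_neg]; omega
  | succ m ih =>
      intro idx ds hds j
      by_cases hidx : idx < scores.length
      · rw [← List.getElem_cons_drop hidx, List.take_succ_cons]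
        simp only [dsLoop]
        rw [ih (idx + 1) _ (by simp [hds]) j]
        have hval : dsScanW scores[idx] ((scores.take (idx + 1)).reverse)
              + dsScanW scores[idx] (scores.drop idx) - 2 * scores[idx] = dval scores idx := by
          simp only [dval]
          rw [List.getD_eq_getElem _ _ hidx]
        have hset : (ds.set idx (dsScanW scores[idx] ((scores.take (idx + 1)).reverse)
              + dsScanW scores[idx] (scores.drop idx) - 2 * scores[idx])).getD j 0
              = if idx = j then dval scores idx else ds.getD j 0 := by
          rw [List.getD_eq_getElem?_getD, List.getElem?_set]
          by_cases h : idx = j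
          · subst h
            rw [if_pos rfl, if_pos rfl, if_pos (show idx < ds.length by omega)]
            simpa using hval
          · rw [if_neg h, if_neg h, ← List.getD_eq_getElem?_getD]
        rw [hset]
        rcases eq_or_ne idx j with h1 | h1
        · subst h1
          rw [if_neg (by omega), if_pos rfl, if_pos (by omega)]
        · rw [if_neg h1]
          by_cases h2 : idx + 1 ≤ j ∧ j < idx + 1 + m ∧ j < scores.length
          · rw [if_pos h2, if_pos (by omega)]
          · rw [if_neg h2, if_neg (by omega)]
      · have hnil : scores.drop idx = [] := by rw [List.drop_eq_nil_iff]; omega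
        rw [hnil]
        simp only [List.take_nil, dsLoop]
        rw [if_neg]; omega

lemma slice_clip (scores : List Int) (clip : Nat) (hclip : 0 < clip) :
    PySem.List.slice scores (some (clip : Int)) (some (-(clip : Int)))
    = (scores.drop clip).take (scores.length - clip - clip) := by
  by_cases h : clip ≤ scores.length
  · simp [PySem.List.slice, PySem.List.clampIdx_neg_natCast _ _ hclip, Nat.min_eq_left h]
  · have h1 : scores.drop clip = [] := by rw [List.drop_eq_nil_iff]; omega
    have h2 : scores.drop (min clip scores.length) = [] := by rw [List.drop_eq_nil_iff]; omega

    simp [PySem.List.slice, PySem.List.clampIdx_neg_natCast _ _ hclip, h1, h2]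

lemma runPeaksAux_length (l : List Int) : ∀ (p v : Int), (runPeaksAux p v l).length = l.length := by
  induction l with
  | nil => intro p v; simp [runPeaksAux]
  | cons s rest ih => intro p v; simp [runPeaksAux, ih]

lemma runPeaksAux_getD (l : List Int) :
    ∀ (c : List Int) (prev : Int) (j : Nat), j < l.length →
      (runPeaksAux (dsScanW prev c) prev l).getD j 0
      = dsScanW (l.getD j 0) ((l.take (j + 1)).reverse ++ prev :: c) := by
  induction l with
  | nil => intro c prev j hj; simp at hj
  | cons s rest ih =>
      intro c prev j hj
      have hp : (if prev ≥ s then dsScanW prev c else s) = dsScanW s (prev :: c) := by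
        simp [dsScanW]
      match j with
      | 0 =>
          simp only [runPeaksAux, List.getD_cons_zero, List.take_succ_cons, List.take_zero,
            List.reverse_cons, List.reverse_nil, List.nil_append, List.cons_append,
            List.nil_append]
          rw [hp, dsScanW_cons_self]
      | j + 1 =>
          have hj' : j < rest.length := by simpa using hj
          simp only [runPeaksAux, List.getD_cons_succ, List.take_succ_cons, List.reverse_cons,
            List.append_assoc, List.cons_append, List.nil_append]
          rw [hp, ih (prev :: c) s j hj']

lemma runPeaks_length (l : List Int) : (runPeaks l).length = l.length := by
  cases l with
  | nil => simp [runPeaks]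
  | cons s rest => simp [runPeaks, runPeaksAux_length]

lemma runPeaks_getD (scores : List Int) (j : Nat) (hj : j < scores.length) :
    (runPeaks scores).getD j 0 = dsScanW (scores.getD j 0) ((scores.take (j + 1)).reverse) := by
  cases scores with
  | nil => simp at hj
  | cons a t =>
      match j with
      | 0 => simp [runPeaks, dsScanW]
      | j + 1 =>
          have hj' : j < t.length := by simpa using hj
          simp only [runPeaks, List.getD_cons_succ, List.take_succ_cons, List.reverse_cons]
          nth_rewrite 1 [show (a : Int) = dsScanW a [] from by simp [dsScanW]]
          rw [runPeaksAux_getD t [] a j hj']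

lemma right_getD (scores : List Int) (j : Nat) (hj : j < scores.length) :
    ((runPeaks scores.reverse).reverse).getD j 0 = dsScanW (scores.getD j 0) (scores.drop j) := by
  have hlen2 : (runPeaks scores.reverse).length = scores.length := by simp [runPeaks_length]
  have hlen : ((runPeaks scores.reverse).reverse).length = scores.length := by
    rw [List.length_reverse, hlen2]
  have hb : (runPeaks scores.reverse).length - 1 - j < (runPeaks scores.reverse).length := by
    rw [hlen2]; omega
  rw [List.getD_eq_getElem _ 0 (by rw [hlen]; exact hj), List.getElem_reverse,
      ← List.getD_eq_getElem _ 0 hb]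
  simp only [hlen2]
  rw [runPeaks_getD scores.reverse (scores.length - 1 - j) (by rw [List.length_reverse]; omega)]
  have hj2 : scores.length - 1 - j < scores.reverse.length := by rw [List.length_reverse]; omega
  have h1 : scores.reverse.getD (scores.length - 1 - j) 0 = scores.getD j 0 := by
    rw [List.getD_eq_getElem _ _ hj2, List.getElem_reverse, List.getD_eq_getElem _ _ hj]
    congr 1
    omega
  have h2 : (scores.reverse.take (scores.length - 1 - j + 1)).reverse = scores.drop j := by
    have he : scores.length - 1 - j + 1 = scores.length - j := by omega
    rw [he, List.take_reverse, List.reverse_reverse]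
    congr 1
    omega
  rw [h1, h2]

lemma enumerate_getElem? {α : Type} (xs : List α) :
    ∀ (s : Int) (j : Nat),
      (PySem.List.enumerate xs s)[j]? = xs[j]?.map (fun x => (s + (j : Int), x)) := by
  induction xs with
  | nil => intro s j; simp [PySem.List.enumerate]
  | cons x t ih =>
      intro s j
      match j with
      | 0 => simp [PySem.List.enumerate_cons]
      | j + 1 =>
          rw [PySem.List.enumerate_cons]
          simp only [List.getElem?_cons_succ]
          rw [ih (s + 1) j]
          have : (fun x : α => (s + 1 + (j : Int), x))
               = (fun x : α => (s + ((j + 1 : Nat) : Int), x)) := by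
            funext y; push_cast; ring_nf
          rw [this]

lemma dsBoth_eq (scores : List Int) (clip : Nat) (hclip : 0 < clip) :
    (dsLoop scores (PySem.List.slice scores (some (clip : Int)) (some (-(clip : Int))))
        ((scores.map fun _ => (0 : Int)), clip)).1
    = (PySem.List.enumerate
        (scores.zip ((runPeaks scores).zip ((runPeaks scores.reverse).reverse)))).map
        (fun p => if (clip : Int) ≤ p.1 ∧ p.1 < (scores.length : Int) - (clip : Int)
                  then p.2.2.1 + p.2.2.2 - 2 * p.2.1 else 0) := by
  have hleftlen : (runPeaks scores).length = scores.length := runPeaks_length scores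
  have hrightlen : ((runPeaks scores.reverse).reverse).length = scores.length := by
    rw [List.length_reverse, runPeaks_length, List.length_reverse]
  have hzl : (scores.zip ((runPeaks scores).zip ((runPeaks scores.reverse).reverse))).length
      = scores.length := by
    rw [List.length_zip, List.length_zip, hleftlen, hrightlen]; omega
  have henlen : (PySem.List.enumerate
      (scores.zip ((runPeaks scores).zip ((runPeaks scores.reverse).reverse)))).length
      = scores.length := by
    rw [PySem.List.length_enumerate, hzl]
  have hAlen : ((dsLoop scores (PySem.List.slice scores (some (clip : Int)) (some (-(clip : Int))))
      ((scores.map fun _ => (0 : Int)), clip)).1).length = scores.length := by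
    rw [dsLoop_fst_length, List.length_map]
  apply List.ext_getElem (by rw [hAlen, List.length_map, henlen])
  intro j h1 h2
  have hj : j < scores.length := hAlen ▸ h1
  -- A's entry j
  have hA : ((dsLoop scores (PySem.List.slice scores (some (clip : Int)) (some (-(clip : Int))))
        ((scores.map fun _ => (0 : Int)), clip)).1)[j]'h1
      = if clip ≤ j ∧ j + clip < scores.length then dval scores j else 0 := by
    rw [← List.getD_eq_getElem _ 0 h1, slice_clip scores clip hclip,
        dsLoop_getD scores (scores.length - clip - clip) clip _ (by rw [List.length_map]) j]
    have hinit : (scores.map fun _ => (0 : Int)).getD j 0 = 0 := by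
      rw [List.getD_eq_getElem _ _ (by rw [List.length_map]; exact hj), List.getElem_map]
    rw [hinit]
    by_cases h : clip ≤ j ∧ j + clip < scores.length
    · rw [if_pos (by omega), if_pos h]
    · rw [if_neg (by omega), if_neg h]
  rw [hA, List.getElem_map]
  -- B's entry j
  have hzval : (scores.zip ((runPeaks scores).zip ((runPeaks scores.reverse).reverse)))[j]'(by
        rw [hzl]; exact hj)
      = (scores[j]'hj, ((runPeaks scores)[j]'(by rw [hleftlen]; exact hj),
         ((runPeaks scores.reverse).reverse)[j]'(by rw [hrightlen]; exact hj))) := by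
    rw [List.getElem_zip, List.getElem_zip]
  have henum : (PySem.List.enumerate
        (scores.zip ((runPeaks scores).zip ((runPeaks scores.reverse).reverse))))[j]'(by
          rw [henlen]; exact hj)
      = ((0 : Int) + (j : Int),
         (scores.zip ((runPeaks scores).zip ((runPeaks scores.reverse).reverse)))[j]'(by
          rw [hzl]; exact hj)) := by
    have h := enumerate_getElem?
      (scores.zip ((runPeaks scores).zip ((runPeaks scores.reverse).reverse))) 0 j
    rw [List.getElem?_eq_getElem (by rw [henlen]; exact hj),
        List.getElem?_eq_getElem (by rw [hzl]; exact hj)] at h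
    simpa using h
  rw [henum, hzval]
  have hleft : (runPeaks scores)[j]'(by rw [hleftlen]; exact hj)
      = dsScanW (scores[j]'hj) ((scores.take (j + 1)).reverse) := by
    rw [← List.getD_eq_getElem _ 0 (by rw [hleftlen]; exact hj), runPeaks_getD scores j hj,
        List.getD_eq_getElem _ _ hj]
  have hright : ((runPeaks scores.reverse).reverse)[j]'(by rw [hrightlen]; exact hj)
      = dsScanW (scores[j]'hj) (scores.drop j) := by
    rw [← List.getD_eq_getElem _ 0 (by rw [hrightlen]; exact hj), right_getD scores j hj,
        List.getD_eq_getElem _ _ hj]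
  have hdval : dval scores j
      = dsScanW (scores[j]'hj) ((scores.take (j + 1)).reverse)
        + dsScanW (scores[j]'hj) (scores.drop j) - 2 * (scores[j]'hj) := by
    unfold dval
    rw [List.getD_eq_getElem _ _ hj]
  by_cases h : clip ≤ j ∧ j + clip < scores.length
  · rw [if_pos h, if_pos (by omega)]
    rw [hdval, hleft, hright]
  · rw [if_neg h, if_neg (by omega)]

-- ===== VERDICT (by name: the statement is the Claim_ definition above) =====
theorem depth_scores_py_spec : Claim_equal_depth_scores_py := by
  intro scores _
  show depth_scores_py scores = depth_scores_py_alt scores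
  simp only [depth_scores_py, depth_scores_py_alt]
  exact dsBoth_eq scores (min (max (scores.length / 10) 2) 5) (by omega)
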